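-- pv_equiv track=rewrite | github.com/mikanystrom/intel-async | async-toolkit/m3utils/m3utils/sv/src/svpp.py | parse_macro_args
-- ===== SOURCE A (Python) =====
-- def parse_macro_args(line, pos):
--     """Parse macro arguments starting at pos, expecting '(' ... ')'.
--     Returns (list_of_args, end_pos) or (None, pos) if no parens."""
--     if pos >= len(line) or line[pos] != '(':
--         return None, pos
--     depth = 1
--     start = pos + 1
--     args = []
--     i = start
--     while i < len(line):
--         c = line[i]
--         if c == '(':
--             depth += 1
--         elif c == ')':
--             depth -= 1
--             if depth == 0:
--                 args.append(line[start:i].strip())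
--                 return args, i + 1
--         elif c == ',' and depth == 1:
--             args.append(line[start:i].strip())
--             start = i + 1
--         i += 1
--     return None, pos
-- ===== SOURCE B (Python) =====
-- def parse_macro_args(line, pos):
--     """Parse macro arguments starting at pos, expecting '(' ... ')'.
--     Returns (list_of_args, end_pos) or (None, pos) if no parens."""
--     n = len(line)
--     if pos < 0 or pos >= n or line[pos] != '(':
--         return None, pos
--     # pass 1: find the matching top-level ')'
--     depth = 0
--     close = -1
--     for i in range(pos, n):
--         c = line[i]
--         if c == '(':
--             depth += 1
--         elif c == ')':
--             depth -= 1
--             if depth == 0: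
--                 close = i
--                 break
--     if close < 0:
--         return None, pos
--     # pass 2: split the inner text at depth-0 commas, stripping each piece
--     args = []
--     cur = []
--     d = 0
--     for c in line[pos + 1:close]:
--         if c == '(':
--             d += 1
--             cur.append(c)
--         elif c == ')':
--             d -= 1
--             cur.append(c)
--         elif c == ',' and d == 0:
--             args.append(''.join(cur).strip())
--             cur = []
--         else:
--             cur.append(c)
--     args.append(''.join(cur).strip())
--     return args, close + 1
-- ===== Notes on version B (the rewrite author's own statement) =====
-- stated objective: alternative
-- what changed: A parses arguments in one combined scan that appends pieces while tracking depth; B decomposes the job into two passes: a depth-only scan that locates the matching top-level ')' and a separate splitter that cuts the inner text at depth-0 commas and strips each piece.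
-- intended difference: For negative pos with -len(line) <= pos and line[pos] == '(' by Python wraparound, when A's wrapped scan does reach a top-level ')', A returns arguments parsed from that wrapped-around region while B returns (None, pos); B's value is intended because a negative position is not an actual '(' at pos. — e.g. on parse_macro_args("(a)", -3): A returns (some ["a"], 0), B returns (none, -3)
import Mathlib
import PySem

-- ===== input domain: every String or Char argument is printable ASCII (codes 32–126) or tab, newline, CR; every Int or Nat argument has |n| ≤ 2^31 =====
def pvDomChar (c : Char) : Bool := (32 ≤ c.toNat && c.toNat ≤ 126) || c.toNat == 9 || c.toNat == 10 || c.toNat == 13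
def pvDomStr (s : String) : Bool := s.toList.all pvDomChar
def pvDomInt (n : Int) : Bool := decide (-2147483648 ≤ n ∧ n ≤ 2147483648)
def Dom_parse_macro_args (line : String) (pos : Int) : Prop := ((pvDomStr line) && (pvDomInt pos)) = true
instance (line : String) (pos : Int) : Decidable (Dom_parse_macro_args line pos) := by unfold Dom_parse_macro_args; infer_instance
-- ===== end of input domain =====

-- B splits the job into two passes (find the matching ')' then split the inner text at
-- top-level commas); same cost, different decomposition. Return value only; no mutation.

-- ===== PORT A =====
-- A's while-loop, step for step; fuel only bounds the iteration count (i grows towards len).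
def pvALoop (cs : List Char) (pos : Int) (fuel : Nat) (i depth start : Int)
    (args : List String) : Option (List String) × Int :=
  if i < (cs.length : Int) then
    match fuel with
    | 0 => (none, pos)   -- unreachable: fuel ≥ number of chars left to scan
    | fuel + 1 =>
      match PySem.List.pyGet? cs i with
      | none => (none, pos)   -- unreachable under Pre_: every index the loop reads is in range
      | some c =>
        if c = '(' then pvALoop cs pos fuel (i+1) (depth+1) start args
        else if c = ')' then
          if depth - 1 = 0 then
            (some (args ++ [String.ofList (PySem.Chars.strip (PySem.List.slice cs (some start) (some i)))]), i + 1)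
          else pvALoop cs pos fuel (i+1) (depth-1) start args
        else if c = ',' ∧ depth = 1 then
          pvALoop cs pos fuel (i+1) depth (i+1)
            (args ++ [String.ofList (PySem.Chars.strip (PySem.List.slice cs (some start) (some i)))])
        else pvALoop cs pos fuel (i+1) depth start args
  else (none, pos)

def parse_macro_args (line : String) (pos : Int) : Option (List String) × Int :=
  let cs := line.toList
  if pos ≥ (cs.length : Int) ∨ PySem.List.pyGet? cs pos ≠ some '(' then (none, pos)
  else pvALoop cs pos (2 * cs.length + 2) (pos + 1) 1 (pos + 1) []

-- ===== PORT B =====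
-- pass 1 of Source B: scan from pos for the first index where the depth returns to 0
def pvFindClose : List Char → Nat → Int → Option Nat
  | [], _, _ => none
  | c :: rest, i, depth =>
    if c = '(' then pvFindClose rest (i+1) (depth+1)
    else if c = ')' then
      if depth - 1 = 0 then some i else pvFindClose rest (i+1) (depth-1)
    else pvFindClose rest (i+1) depth

-- pass 2 of Source B: split the inner text at depth-0 commas, stripping each piece
def pvSplit : List Char → Int → List Char → List String → List String
  | [], _, cur, args => args ++ [String.ofList (PySem.Chars.strip cur)]
  | c :: rest, d, cur, args =>
    if c = '(' then pvSplit rest (d+1) (cur ++ [c]) args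
    else if c = ')' then pvSplit rest (d-1) (cur ++ [c]) args
    else if c = ',' ∧ d = 0 then pvSplit rest d [] (args ++ [String.ofList (PySem.Chars.strip cur)])
    else pvSplit rest d (cur ++ [c]) args

def parse_macro_args_alt (line : String) (pos : Int) : Option (List String) × Int :=
  let cs := line.toList
  if pos < 0 ∨ pos ≥ (cs.length : Int) ∨ PySem.List.pyGet? cs pos ≠ some '(' then (none, pos)
  else
    match pvFindClose (cs.drop pos.toNat) pos.toNat 0 with
    | none => (none, pos)
    | some k =>
        (some (pvSplit (PySem.List.slice cs (some (pos + 1)) (some (k : Int))) 0 [] []), (k : Int) + 1)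

-- ===== PRECONDITION & SPEC =====
-- Pre_ excludes exactly pos < -len(line), where A raises IndexError on line[pos].
def Pre_parse_macro_args (line : String) (pos : Int) : Prop :=
  -(line.toList.length : Int) ≤ pos
instance (line : String) (pos : Int) : Decidable (Pre_parse_macro_args line pos) := by
  unfold Pre_parse_macro_args; infer_instance
def pvWitness_parse_macro_args : String × Int := ("(a, b)", 0)

-- D_: negative pos with line[pos] == '(' by Python's wraparound, when A's wrapped scan does
-- reach a top-level ')': A returns arguments parsed from that wrapped-around region, B returns
-- (None, pos); B's value is intended, since a negative position is not a real '(' at pos.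
def D_parse_macro_args (line : String) (pos : Int) : Prop :=
  let cs := line.toList
  let seq := if pos + 1 < 0 then cs.drop ((cs.length : Int) + pos + 1).toNat ++ cs else cs
  pos < 0 ∧ -(cs.length : Int) ≤ pos ∧ PySem.List.pyGet? cs pos = some '(' ∧
    ∃ k ≤ seq.length, ((seq.take k).count '(' : Int) < ((seq.take k).count ')' : Int)
instance (line : String) (pos : Int) : Decidable (D_parse_macro_args line pos) := by
  unfold D_parse_macro_args; infer_instance

def Spec_parse_macro_args (line : String) (pos : Int) (out : Option (List String) × Int) : Prop :=
  ¬ D_parse_macro_args line pos → out = parse_macro_args_alt line pos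
instance (line : String) (pos : Int) (out : Option (List String) × Int) :
    Decidable (Spec_parse_macro_args line pos out) := by
  unfold Spec_parse_macro_args; infer_instance

def pvDiffWitness_parse_macro_args : String × Int := ("(a)", -3)
def pvDiffWitnessOut_parse_macro_args :
    (Option (List String) × Int) × (Option (List String) × Int) :=
  ((some ["a"], 0), (none, -3))

-- ===== CLAIM (what is proved, stated in full; the proofs are below) =====
def Claim_unchanged_parse_macro_args : Prop := ∀ (line : String) (pos : Int), Dom_parse_macro_args line pos → Pre_parse_macro_args line pos → Spec_parse_macro_args line pos (parse_macro_args line pos)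
def Claim_changed_parse_macro_args : Prop := Dom_parse_macro_args (pvDiffWitness_parse_macro_args.1) (pvDiffWitness_parse_macro_args.2) ∧ Pre_parse_macro_args (pvDiffWitness_parse_macro_args.1) (pvDiffWitness_parse_macro_args.2) ∧ D_parse_macro_args (pvDiffWitness_parse_macro_args.1) (pvDiffWitness_parse_macro_args.2) ∧ parse_macro_args (pvDiffWitness_parse_macro_args.1) (pvDiffWitness_parse_macro_args.2) = pvDiffWitnessOut_parse_macro_args.1 ∧ parse_macro_args_alt (pvDiffWitness_parse_macro_args.1) (pvDiffWitness_parse_macro_args.2) = pvDiffWitnessOut_parse_macro_args.2 ∧ pvDiffWitnessOut_parse_macro_args.1 ≠ pvDiffWitnessOut_parse_macro_args.2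
def Claim_exact_parse_macro_args : Prop := ∀ (line : String) (pos : Int), Dom_parse_macro_args line pos → Pre_parse_macro_args line pos → D_parse_macro_args line pos → parse_macro_args line pos ≠ parse_macro_args_alt line pos

-- ===== LEMMAS AND PROOFS =====

-- one-step equations for the three loops (proof plumbing only)
theorem pvALoop_step_open (cs : List Char) (pos : Int) (fuel : Nat) (i depth start : Int)
    (args : List String) (hg : i < (cs.length : Int))
    (hpg : PySem.List.pyGet? cs i = some '(') :
    pvALoop cs pos (fuel+1) i depth start args = pvALoop cs pos fuel (i+1) (depth+1) start args := by
  rw [pvALoop, if_pos hg]; simp [hpg]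

theorem pvALoop_step_close_hit (cs : List Char) (pos : Int) (fuel : Nat) (i depth start : Int)
    (args : List String) (hg : i < (cs.length : Int))
    (hpg : PySem.List.pyGet? cs i = some ')') (hdz : depth - 1 = 0) :
    pvALoop cs pos (fuel+1) i depth start args =
      (some (args ++ [String.ofList (PySem.Chars.strip (PySem.List.slice cs (some start) (some i)))]), i + 1) := by
  rw [pvALoop, if_pos hg]; simp [hpg, hdz]

theorem pvALoop_step_close (cs : List Char) (pos : Int) (fuel : Nat) (i depth start : Int)
    (args : List String) (hg : i < (cs.length : Int))
    (hpg : PySem.List.pyGet? cs i = some ')') (hdz : depth - 1 ≠ 0) :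
    pvALoop cs pos (fuel+1) i depth start args = pvALoop cs pos fuel (i+1) (depth-1) start args := by
  rw [pvALoop, if_pos hg]; simp [hpg, hdz]

theorem pvALoop_step_comma (cs : List Char) (pos : Int) (fuel : Nat) (i depth start : Int)
    (args : List String) (hg : i < (cs.length : Int))
    (hpg : PySem.List.pyGet? cs i = some ',') (hd1 : depth = 1) :
    pvALoop cs pos (fuel+1) i depth start args =
      pvALoop cs pos fuel (i+1) depth (i+1)
        (args ++ [String.ofList (PySem.Chars.strip (PySem.List.slice cs (some start) (some i)))]) := by
  rw [pvALoop, if_pos hg]; simp [hpg, hd1]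

theorem pvALoop_step_other (cs : List Char) (pos : Int) (fuel : Nat) (i depth start : Int)
    (args : List String) (c : Char) (hg : i < (cs.length : Int))
    (hpg : PySem.List.pyGet? cs i = some c) (hc1 : c ≠ '(') (hc2 : c ≠ ')')
    (hc3 : ¬ (c = ',' ∧ depth = 1)) :
    pvALoop cs pos (fuel+1) i depth start args = pvALoop cs pos fuel (i+1) depth start args := by
  rw [pvALoop, if_pos hg]; simp [hpg, hc1, hc2, hc3]

theorem pvALoop_stop (cs : List Char) (pos : Int) (fuel : Nat) (i depth start : Int)
    (args : List String) (hg : ¬ i < (cs.length : Int)) :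
    pvALoop cs pos fuel i depth start args = (none, pos) := by
  cases fuel with
  | zero => rw [pvALoop, if_neg hg]
  | succ f => rw [pvALoop, if_neg hg]

theorem pvFindClose_open (rest : List Char) (i : Nat) (d : Int) :
    pvFindClose ('(' :: rest) i d = pvFindClose rest (i+1) (d+1) := by
  simp [pvFindClose]

theorem pvFindClose_close (rest : List Char) (i : Nat) (d : Int) :
    pvFindClose (')' :: rest) i d =
      if d - 1 = 0 then some i else pvFindClose rest (i+1) (d-1) := by
  simp [pvFindClose]

theorem pvFindClose_other (rest : List Char) (i : Nat) (d : Int) (c : Char)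
    (hc1 : c ≠ '(') (hc2 : c ≠ ')') :
    pvFindClose (c :: rest) i d = pvFindClose rest (i+1) d := by
  simp [pvFindClose, hc1, hc2]

theorem pvSplit_open (rest : List Char) (d : Int) (cur : List Char) (args : List String) :
    pvSplit ('(' :: rest) d cur args = pvSplit rest (d+1) (cur ++ ['(']) args := by
  simp [pvSplit]

theorem pvSplit_close (rest : List Char) (d : Int) (cur : List Char) (args : List String) :
    pvSplit (')' :: rest) d cur args = pvSplit rest (d-1) (cur ++ [')']) args := by
  simp [pvSplit]

theorem pvSplit_comma (rest : List Char) (d : Int) (cur : List Char) (args : List String)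
    (hd : d = 0) :
    pvSplit (',' :: rest) d cur args =
      pvSplit rest d [] (args ++ [String.ofList (PySem.Chars.strip cur)]) := by
  simp [pvSplit, hd]

theorem pvSplit_other (rest : List Char) (d : Int) (cur : List Char) (args : List String)
    (c : Char) (hc1 : c ≠ '(') (hc2 : c ≠ ')') (hc3 : ¬ (c = ',' ∧ d = 0)) :
    pvSplit (c :: rest) d cur args = pvSplit rest d (cur ++ [c]) args := by
  simp [pvSplit, hc1, hc2, hc3]

theorem pvFindClose_ge (L : List Char) : ∀ (i : Nat) (d : Int) (k : Nat),
    pvFindClose L i d = some k → i ≤ k := by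
  induction L with
  | nil => intro i d k h; simp [pvFindClose] at h
  | cons c rest ih =>
    intro i d k h
    simp only [pvFindClose] at h
    split_ifs at h with h1 h2 h3
    · exact le_trans (Nat.le_succ i) (ih (i+1) (d+1) k h)
    · simp only [Option.some.injEq] at h; omega
    · exact le_trans (Nat.le_succ i) (ih (i+1) (d-1) k h)
    · exact le_trans (Nat.le_succ i) (ih (i+1) d k h)

-- main lemma for 0 ≤ pos: A's one-pass loop computes B's two passes
theorem pvALoop_eq_split (cs : List Char) (pos : Int) :
    ∀ (L : List Char) (fuel i start : Nat) (depth : Int) (args : List String),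
    cs.drop i = L → start ≤ i → 1 ≤ depth → L.length ≤ fuel →
    pvALoop cs pos fuel (i : Int) depth (start : Int) args =
      (match pvFindClose L i depth with
      | none => (none, pos)
      | some k =>
          (some (pvSplit (L.take (k - i)) (depth - 1) ((cs.drop start).take (i - start)) args),
            (k : Int) + 1)) := by
  intro L
  induction L with
  | nil =>
    intro fuel i start depth args hL hsi hd hf
    have hi : cs.length ≤ i := by
      have := congrArg List.length hL; simp at this; omega
    rw [pvALoop_stop cs pos fuel (i:Int) depth (start:Int) args (by exact_mod_cast not_lt.mpr hi)]
    simp [pvFindClose]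
  | cons c L' ih =>
    intro fuel i start depth args hL hsi hd hf
    have hlen : i < cs.length := by
      have := congrArg List.length hL; simp at this; omega
    have hcons := List.drop_eq_getElem_cons hlen
    rw [hL] at hcons
    have hget : cs[i] = c := (List.cons.inj hcons).1.symm
    have hdrop : cs.drop (i+1) = L' := ((List.cons.inj hcons).2).symm
    match fuel with
    | 0 => simp at hf
    | fuel+1 =>
      have hguard : (i : Int) < (cs.length : Int) := by exact_mod_cast hlen
      have hpg : PySem.List.pyGet? cs (i : Int) = some c := by
        rw [PySem.List.pyGet?_natCast, List.getElem?_eq_getElem hlen, hget]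
      have hcast : (i : Int) + 1 = ((i+1 : Nat) : Int) := by push_cast; ring
      have hf' : L'.length ≤ fuel := by simp at hf; omega
      have htake : ∀ st : Nat, st ≤ i →
          (cs.drop st).take (i+1-st) = (cs.drop st).take (i-st) ++ [c] := by
        intro st hst
        have h1 : i + 1 - st = (i - st) + 1 := by omega
        rw [h1, List.take_add_one, List.getElem?_drop]
        have h2 : st + (i - st) = i := by omega
        rw [h2, List.getElem?_eq_getElem hlen, hget]; rfl
      by_cases hc1 : c = '('
      · subst hc1
        rw [pvALoop_step_open cs pos fuel (i:Int) depth (start:Int) args hguard hpg]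
        rw [hcast, ih fuel (i+1) start (depth+1) args hdrop (by omega) (by omega) hf']
        rw [pvFindClose_open L' i depth]
        cases hk : pvFindClose L' (i+1) (depth+1) with
        | none => rfl
        | some k =>
          dsimp only
          have hki := pvFindClose_ge L' (i+1) (depth+1) k hk
          have h3 : k - i = (k - (i+1)) + 1 := by omega
          rw [h3, List.take_succ_cons, pvSplit_open]
          rw [htake start hsi]
          have e1 : depth + 1 - 1 = depth - 1 + 1 := by ring
          rw [e1]
      · by_cases hc2 : c = ')'
        · subst hc2
          by_cases hdz : depth - 1 = 0
          · rw [pvALoop_step_close_hit cs pos fuel (i:Int) depth (start:Int) args hguard hpg hdz]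
            rw [pvFindClose_close L' i depth, if_pos hdz]
            dsimp only
            rw [Nat.sub_self, List.take_zero, pvSplit]
            rw [PySem.List.slice_natCast]
          · rw [pvALoop_step_close cs pos fuel (i:Int) depth (start:Int) args hguard hpg hdz]
            rw [hcast, ih fuel (i+1) start (depth-1) args hdrop (by omega) (by omega) hf']
            rw [pvFindClose_close L' i depth, if_neg hdz]
            cases hk : pvFindClose L' (i+1) (depth-1) with
            | none => rfl
            | some k =>
              dsimp only
              have hki := pvFindClose_ge L' (i+1) (depth-1) k hk
              have h3 : k - i = (k - (i+1)) + 1 := by omega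
              rw [h3, List.take_succ_cons, pvSplit_close]
              rw [htake start hsi]
        · by_cases hc3 : c = ',' ∧ depth = 1
          · obtain ⟨hc, hd1⟩ := hc3
            subst hc
            rw [pvALoop_step_comma cs pos fuel (i:Int) depth (start:Int) args hguard hpg hd1]
            rw [hcast, ih fuel (i+1) (i+1) depth
              (args ++ [String.ofList (PySem.Chars.strip (PySem.List.slice cs (some (start:Int)) (some (i:Int))))])
              hdrop (le_refl _) hd hf']
            rw [pvFindClose_other L' i depth ',' (by decide) (by decide)]
            cases hk : pvFindClose L' (i+1) depth with
            | none => rfl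
            | some k =>
              dsimp only
              have hki := pvFindClose_ge L' (i+1) depth k hk
              have h3 : k - i = (k - (i+1)) + 1 := by omega
              rw [h3, List.take_succ_cons, pvSplit_comma _ _ _ _ (by omega)]
              rw [Nat.sub_self, List.take_zero, PySem.List.slice_natCast]
          · rw [pvALoop_step_other cs pos fuel (i:Int) depth (start:Int) args c hguard hpg hc1 hc2
              hc3]
            rw [hcast, ih fuel (i+1) start depth args hdrop (by omega) hd hf']
            rw [pvFindClose_other L' i depth c hc1 hc2]
            cases hk : pvFindClose L' (i+1) depth with
            | none => rfl
            | some k =>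
              dsimp only
              have hki := pvFindClose_ge L' (i+1) depth k hk
              have h3 : k - i = (k - (i+1)) + 1 := by omega
              rw [h3, List.take_succ_cons,
                pvSplit_other _ _ _ _ c hc1 hc2 (fun h => hc3 ⟨h.1, by omega⟩)]
              rw [htake start hsi]

-- the characters A's loop reads from (Int) index i on, Python wraparound included
def pvReadSeq (cs : List Char) (i : Int) : List Char :=
  if i < 0 then cs.drop ((cs.length : Int) + i).toNat ++ cs else cs.drop i.toNat

-- stepping through pvReadSeq: the char A reads at i and what remains after it
theorem pvReadSeq_cons (cs : List Char) (c : Char) (L' : List Char) (i : Int)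
    (hlow : -(cs.length : Int) ≤ i) (h : pvReadSeq cs i = c :: L') :
    PySem.List.pyGet? cs i = some c ∧ pvReadSeq cs (i+1) = L' ∧ i < (cs.length : Int) := by
  by_cases hneg : i < 0
  · have hm : ((cs.length : Int) + i).toNat < cs.length := by omega
    have hd := List.drop_eq_getElem_cons hm
    rw [pvReadSeq, if_pos hneg, hd] at h
    simp only [List.cons_append, List.cons.injEq] at h
    obtain ⟨hc, hL⟩ := h
    have hk : i = -(((-i).toNat : Nat) : Int) := by omega
    refine ⟨?_, ?_, by omega⟩
    · rw [hk, PySem.List.pyGet?_neg_natCast cs ((-i).toNat) (by omega) (by omega)]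
      rw [List.getElem?_eq_getElem (by omega)]
      have : cs.length - (-i).toNat = ((cs.length : Int) + i).toNat := by omega
      simp only [this, hc]
    · by_cases hneg1 : i + 1 < 0
      · rw [pvReadSeq, if_pos hneg1]
        have : ((cs.length : Int) + (i+1)).toNat = ((cs.length : Int) + i).toNat + 1 := by omega
        rw [this, ← hL]
      · have hi1 : i + 1 = 0 := by omega
        rw [pvReadSeq, if_neg hneg1, hi1]
        have : ((cs.length : Int) + i).toNat + 1 = cs.length := by omega
        rw [this] at hL
        simp at hL
        simp [← hL]
  · have h0 : (0:Int) ≤ i := by omega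
    rw [pvReadSeq, if_neg hneg] at h
    have hm : i.toNat < cs.length := by
      by_contra hge
      rw [List.drop_eq_nil_of_le (by omega)] at h; simp at h
    have hd := List.drop_eq_getElem_cons hm
    rw [hd] at h
    obtain ⟨hc, hL⟩ := List.cons.inj h
    refine ⟨?_, ?_, by omega⟩
    · rw [PySem.List.pyGet?_of_nonneg cs h0, List.getElem?_eq_getElem hm, hc]
    · rw [pvReadSeq, if_neg (by omega)]
      have : (i + 1).toNat = i.toNat + 1 := by omega
      rw [this, hL]

theorem pvReadSeq_nil (cs : List Char) (i : Int) (hlow : -(cs.length : Int) ≤ i)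
    (h : pvReadSeq cs i = []) : ¬ i < (cs.length : Int) := by
  by_cases hneg : i < 0
  · rw [pvReadSeq, if_pos hneg] at h
    simp at h
    omega
  · rw [pvReadSeq, if_neg hneg] at h
    have := congrArg List.length h
    simp at this
    omega

-- negative-phase scan, no top-level ')': A falls off the end and returns (none, pos)
theorem pvALoop_none (cs : List Char) (pos : Int) :
    ∀ (L : List Char) (fuel : Nat) (i depth start : Int) (args : List String),
    -(cs.length : Int) ≤ i → pvReadSeq cs i = L → L.length ≤ fuel → 1 ≤ depth →
    (∀ k : Nat, ((L.take k).count ')' : Int) ≤ ((L.take k).count '(' : Int) + depth - 1) →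
    pvALoop cs pos fuel i depth start args = (none, pos) := by
  intro L
  induction L with
  | nil =>
    intro fuel i depth start args hlow hseq hf hd hcnt
    exact pvALoop_stop cs pos fuel i depth start args (pvReadSeq_nil cs i hlow hseq)
  | cons c L' ih =>
    intro fuel i depth start args hlow hseq hf hd hcnt
    obtain ⟨hpg, hnext, hg⟩ := pvReadSeq_cons cs c L' i hlow hseq
    match fuel with
    | 0 => simp at hf
    | fuel+1 =>
      have hf' : L'.length ≤ fuel := by simp at hf; omega
      have hlow' : -(cs.length : Int) ≤ i + 1 := by omega
      by_cases hc1 : c = '('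
      · subst hc1
        rw [pvALoop_step_open cs pos fuel i depth start args hg hpg]
        refine ih fuel (i+1) (depth+1) start args hlow' hnext hf' (by omega) ?_
        intro k
        have := hcnt (k+1)
        simp [List.take_succ_cons] at this ⊢
        omega
      · by_cases hc2 : c = ')'
        · subst hc2
          have h1 := hcnt 1
          simp [List.take_succ_cons] at h1
          have hdz : depth - 1 ≠ 0 := by omega
          rw [pvALoop_step_close cs pos fuel i depth start args hg hpg hdz]
          refine ih fuel (i+1) (depth-1) start args hlow' hnext hf' (by omega) ?_
          intro k
          have := hcnt (k+1)
          simp [List.take_succ_cons] at this ⊢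
          omega
        · have hcnt' : ∀ k : Nat, (((L'.take k).count ')' : Int)) ≤ ((L'.take k).count '(' : Int) + depth - 1 := by
            intro k
            have := hcnt (k+1)
            simp [List.take_succ_cons, hc1, hc2] at this ⊢
            omega
          by_cases hc3 : c = ',' ∧ depth = 1
          · rw [hc3.1] at hpg
            rw [pvALoop_step_comma cs pos fuel i depth start args hg hpg hc3.2]
            exact ih fuel (i+1) depth (i+1) _ hlow' hnext hf' hd hcnt'
          · rw [pvALoop_step_other cs pos fuel i depth start args c hg hpg hc1 hc2 hc3]
            exact ih fuel (i+1) depth start args hlow' hnext hf' hd hcnt'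

-- negative-phase scan, some prefix closes: A returns a 'some' result
theorem pvALoop_some (cs : List Char) (pos : Int) :
    ∀ (L : List Char) (fuel : Nat) (i depth start : Int) (args : List String),
    -(cs.length : Int) ≤ i → pvReadSeq cs i = L → L.length ≤ fuel → 1 ≤ depth →
    (∃ k : Nat, ((L.take k).count '(' : Int) + depth - 1 < ((L.take k).count ')' : Int)) →
    (pvALoop cs pos fuel i depth start args).1.isSome := by
  intro L
  induction L with
  | nil =>
    intro fuel i depth start args hlow hseq hf hd hcnt
    obtain ⟨k, hk⟩ := hcnt
    simp at hk
    omega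
  | cons c L' ih =>
    intro fuel i depth start args hlow hseq hf hd hcnt
    obtain ⟨hpg, hnext, hg⟩ := pvReadSeq_cons cs c L' i hlow hseq
    obtain ⟨k, hk⟩ := hcnt
    match k with
    | 0 => simp at hk; omega
    | k+1 =>
    match fuel with
    | 0 => simp at hf
    | fuel+1 =>
      have hf' : L'.length ≤ fuel := by simp at hf; omega
      have hlow' : -(cs.length : Int) ≤ i + 1 := by omega
      by_cases hc1 : c = '('
      · subst hc1
        rw [pvALoop_step_open cs pos fuel i depth start args hg hpg]
        refine ih fuel (i+1) (depth+1) start args hlow' hnext hf' (by omega) ⟨k, ?_⟩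
        simp [List.take_succ_cons] at hk ⊢
        omega
      · by_cases hc2 : c = ')'
        · subst hc2
          by_cases hdz : depth - 1 = 0
          · rw [pvALoop_step_close_hit cs pos fuel i depth start args hg hpg hdz]
            rfl
          · rw [pvALoop_step_close cs pos fuel i depth start args hg hpg hdz]
            refine ih fuel (i+1) (depth-1) start args hlow' hnext hf' (by omega) ⟨k, ?_⟩
            simp [List.take_succ_cons] at hk ⊢
            omega
        · have hk' : ((L'.take k).count '(' : Int) + depth - 1 < ((L'.take k).count ')' : Int) := by
            simp [List.take_succ_cons, hc1, hc2] at hk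
            omega
          by_cases hc3 : c = ',' ∧ depth = 1
          · rw [hc3.1] at hpg
            rw [pvALoop_step_comma cs pos fuel i depth start args hg hpg hc3.2]
            exact ih fuel (i+1) depth (i+1) _ hlow' hnext hf' hd ⟨k, hk'⟩
          · rw [pvALoop_step_other cs pos fuel i depth start args c hg hpg hc1 hc2 hc3]
            exact ih fuel (i+1) depth start args hlow' hnext hf' hd ⟨k, hk'⟩

-- D_'s scan sequence is what A's loop reads from index pos+1 on
theorem pvSeq_eq (cs : List Char) (pos : Int) (hneg : pos < 0) :
    pvReadSeq cs (pos + 1) =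
      (if pos + 1 < 0 then cs.drop ((cs.length : Int) + pos + 1).toNat ++ cs else cs) := by
  by_cases h : pos + 1 < 0
  · rw [pvReadSeq, if_pos h, if_pos h]
    have : (cs.length : Int) + (pos + 1) = (cs.length : Int) + pos + 1 := by ring
    rw [this]
  · have h0 : pos + 1 = 0 := by omega
    rw [pvReadSeq, if_neg h, if_neg h, h0]
    simp

theorem pvSeq_len (cs : List Char) (pos : Int) :
    (if pos + 1 < 0 then cs.drop ((cs.length : Int) + pos + 1).toNat ++ cs else cs).length
      ≤ 2 * cs.length + 2 := by
  by_cases h : pos + 1 < 0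
  · rw [if_pos h]
    simp only [List.length_append, List.length_drop]
    omega
  · rw [if_neg h]; omega

-- ===== VERDICT (by name: the statement is the Claim_ definition above) =====
theorem parse_macro_args_spec : Claim_unchanged_parse_macro_args := by
  intro line pos hdom hpre hnd
  have hpre' : -(line.toList.length : Int) ≤ pos := hpre
  simp only [parse_macro_args, parse_macro_args_alt]
  by_cases hneg : pos < 0
  · by_cases hopen : PySem.List.pyGet? line.toList pos = some '('
    · rw [if_neg (by push_neg; exact ⟨by omega, hopen⟩), if_pos (Or.inl hneg)]
      simp only [D_parse_macro_args] at hnd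
      push_neg at hnd
      have hcnt := hnd hneg (by omega) hopen
      refine pvALoop_none line.toList pos _ (2 * line.toList.length + 2) (pos+1) 1 (pos+1) []
        (by omega) (pvSeq_eq _ _ hneg) (pvSeq_len _ _) (by norm_num) ?_
      intro k
      by_cases hle : k ≤ (if pos + 1 < 0 then
          line.toList.drop ((line.toList.length : Int) + pos + 1).toNat ++ line.toList
        else line.toList).length
      · have := hcnt k hle
        omega
      · have := hcnt _ (le_refl _)
        rw [List.take_of_length_le (le_refl _)] at this
        rw [List.take_of_length_le (by omega)]
        omega
    · rw [if_pos (Or.inr hopen), if_pos (Or.inl hneg)]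
  · by_cases hbig : (line.toList.length : Int) ≤ pos
    · rw [if_pos (Or.inl hbig), if_pos (Or.inr (Or.inl hbig))]
    · by_cases hopen : PySem.List.pyGet? line.toList pos = some '('
      · rw [if_neg (by push_neg; exact ⟨by omega, hopen⟩),
          if_neg (by push_neg; exact ⟨by omega, by omega, hopen⟩)]
        have hp : pos = ((pos.toNat : Nat) : Int) := (Int.toNat_of_nonneg (by omega)).symm
        set p := pos.toNat with hpdef
        have hplen : p < line.toList.length := by omega
        have hgetp : line.toList[p] = '(' := by
          rw [hp, PySem.List.pyGet?_natCast, List.getElem?_eq_getElem hplen] at hopen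
          exact Option.some.inj hopen
        have hdropp : line.toList.drop p = '(' :: line.toList.drop (p+1) := by
          rw [List.drop_eq_getElem_cons hplen, hgetp]
        rw [hp]
        rw [hdropp, pvFindClose_open]
        simp only [zero_add]
        have hcast : ((p:Int)) + 1 = ((p+1 : Nat) : Int) := by push_cast; ring
        rw [hcast]
        rw [pvALoop_eq_split line.toList (p : Int) (line.toList.drop (p+1)) (2 * line.toList.length + 2)
          (p+1) (p+1) 1 [] rfl (le_refl _) (by norm_num) (by simp only [List.length_drop]; omega)]
        cases hk : pvFindClose (line.toList.drop (p+1)) (p+1) 1 with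
        | none => rfl
        | some k =>
          dsimp only
          rw [Nat.sub_self, List.take_zero, PySem.List.slice_natCast]
          norm_num
      · rw [if_pos (Or.inr hopen), if_pos (Or.inr (Or.inr hopen))]

theorem parse_macro_args_changed : Claim_changed_parse_macro_args := by
  unfold Claim_changed_parse_macro_args; decide

theorem parse_macro_args_tight : Claim_exact_parse_macro_args := by
  intro line pos hdom hpre hD
  simp only [D_parse_macro_args] at hD
  obtain ⟨hneg, hlow, hopen, k, hkle, hcnt⟩ := hD
  simp only [parse_macro_args, parse_macro_args_alt]
  rw [if_neg (by push_neg; exact ⟨by omega, hopen⟩), if_pos (Or.inl hneg)]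
  intro heq
  have hs := pvALoop_some line.toList pos _ (2 * line.toList.length + 2) (pos+1) 1 (pos+1) []
    (by omega) (pvSeq_eq _ _ hneg) (pvSeq_len _ _) (by norm_num) ⟨k, by omega⟩
  rw [heq] at hs
  simp at hs
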